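-- pv_equiv track=rewrite | github.com/e-likoudi/scripts_v2 | protocol_tools/group_similar.py | group_by_first_token
-- ===== SOURCE A (Python) =====
-- from collections import defaultdict
--
-- def group_by_first_token(items, key):
--     """Groups extracted data by the first part before '|' in formatted strings"""
--     groups = defaultdict(list)
--     for item in items:
--         for entry in item.get(key, []):
--             if "|" in entry:
--                 first_token = entry.split("|")[0].strip()
--                 groups[first_token].append(entry)
--     return dict(groups)
-- ===== SOURCE B (Python) =====
-- def group_by_first_token(items, key):
--     """Groups extracted data by the first part before '|' in formatted strings"""
--     entries = [e for item in items for e in item.get(key, []) if "|" in e]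
--     tokens = list(dict.fromkeys(e.split("|")[0].strip() for e in entries))
--     return {t: [e for e in entries if e.split("|")[0].strip() == t] for t in tokens}
-- ===== Notes on version B (the rewrite author's own statement) =====
-- stated objective: alternative
-- what changed: Replaced the single-pass append-into-defaultdict loop by a flatten-then-group pipeline: first collect all '|'-containing entries into one flat list, then dedup their first tokens in order of appearance, then build each group by filtering the flat list per token.
import Mathlib
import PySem

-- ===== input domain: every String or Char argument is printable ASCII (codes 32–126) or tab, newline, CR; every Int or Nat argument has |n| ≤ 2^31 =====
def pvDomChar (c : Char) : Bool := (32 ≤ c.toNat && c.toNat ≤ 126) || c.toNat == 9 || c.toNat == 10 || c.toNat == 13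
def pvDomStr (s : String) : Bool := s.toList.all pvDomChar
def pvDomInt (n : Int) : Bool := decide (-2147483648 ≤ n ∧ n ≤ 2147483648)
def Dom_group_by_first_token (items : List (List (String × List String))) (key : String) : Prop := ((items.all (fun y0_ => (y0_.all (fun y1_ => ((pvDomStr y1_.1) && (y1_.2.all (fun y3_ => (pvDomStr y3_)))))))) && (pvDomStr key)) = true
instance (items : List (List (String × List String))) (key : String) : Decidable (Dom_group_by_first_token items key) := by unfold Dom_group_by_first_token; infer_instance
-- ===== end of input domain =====

-- B replaces A's single-pass append-into-defaultdict loop by a flatten / dedup-tokens / filter-per-token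
-- pipeline (alternative decomposition, same return value).

-- shared token computation: entry.split("|")[0].strip(); splitOn with a non-empty separator always
-- returns a non-empty list, so Python's [0] never raises and the .getD "" default is unreachable
def pvFirstTok (e : String) : String :=
  PySem.Str.strip ((PySem.List.pyGet? ((PySem.Str.split? e "|").getD []) 0).getD "")

-- ===== PORT A =====
def group_by_first_token (items : List (List (String × List String))) (key : String) : List (String × List String) :=
  (items.foldl (fun groups item =>
      ((PySem.Dict.mk item).getD key []).foldl (fun groups entry =>
          if PySem.Str.isIn "|" entry then
            groups.modify (pvFirstTok entry) [] (· ++ [entry])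
          else groups)
        groups)
    PySem.Dict.empty).items

-- ===== PORT B =====
def group_by_first_token_alt (items : List (List (String × List String))) (key : String) : List (String × List String) :=
  let entries := items.flatMap (fun item =>
    ((PySem.Dict.mk item).getD key []).filter (fun e => PySem.Str.isIn "|" e))
  (PySem.List.dedup (entries.map pvFirstTok)).map
    (fun t => (t, entries.filter (fun e => pvFirstTok e == t)))

-- ===== PRECONDITION & SPEC =====
def Spec_group_by_first_token (items : List (List (String × List String))) (key : String) (out : List (String × List String)) : Prop := out = group_by_first_token_alt items key
instance (items : List (List (String × List String))) (key : String) (out : List (String × List String)) : Decidable (Spec_group_by_first_token items key out) := by unfold Spec_group_by_first_token; infer_instance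

-- ===== CLAIM (what is proved, stated in full; the proofs are below) =====
def Claim_equal_group_by_first_token : Prop := ∀ (items : List (List (String × List String))) (key : String), Dom_group_by_first_token items key → Spec_group_by_first_token items key (group_by_first_token items key)

-- ===== LEMMAS AND PROOFS =====

-- a guarded foldl is a foldl over the filtered list
theorem foldl_if_eq_foldl_filter {α β : Type} (p : α → Bool) (f : β → α → β) :
    ∀ (l : List α) (d : β),
      l.foldl (fun g e => if p e then f g e else g) d = (l.filter p).foldl f d := by
  intro l
  induction l with
  | nil => intro d; rfl
  | cons x xs ih =>
    intro d
    by_cases h : p x = true <;> simp [List.foldl_cons, h, ih]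

-- folding the inner lists one after another is folding the flattened list
theorem foldl_foldl_eq_foldl_flatMap {α β γ : Type} (g : α → List γ) (f : β → γ → β) :
    ∀ (l : List α) (d : β),
      l.foldl (fun d it => (g it).foldl f d) d = (l.flatMap g).foldl f d := by
  intro l
  induction l with
  | nil => intro d; rfl
  | cons x xs ih => intro d; simp [List.foldl_cons, List.flatMap_cons, List.foldl_append, ih]

-- a dict with Nodup keys is its keys paired with their values
theorem items_eq_keys_map (d : PySem.Dict String (List String)) (h : d.keys.Nodup) :
    d.items = d.keys.map (fun k => (k, d.getD k [])) := by
  have : d.keys.map (fun k => (k, d.getD k [])) = d.items.map (fun p => (p.1, d.getD p.1 [])) := by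
    simp [PySem.Dict.keys, List.map_map, Function.comp]
  rw [this]
  conv_lhs => rw [show d.items = d.items.map id from (List.map_id _).symm]
  apply List.map_congr_left
  intro p hp
  have hget : d.get? p.1 = some p.2 :=
    PySem.Dict.get?_of_mem_items d (by simpa using hp) h
  rw [PySem.Dict.getD_of_get?_eq_some d [] hget]
  simp

-- the characterisation of A's grouping loop over the flat entry list
theorem grouping_loop_items (L : List String) :
    (L.foldl (fun g e => g.modify (pvFirstTok e) [] (· ++ [e])) PySem.Dict.empty).items
      = (PySem.List.dedup (L.map pvFirstTok)).map
          (fun t => (t, L.filter (fun e => pvFirstTok e == t))) := by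
  set D := L.foldl (fun g e => g.modify (pvFirstTok e) [] (· ++ [e])) PySem.Dict.empty with hD
  have hkeys : D.keys = PySem.List.dedup (L.map pvFirstTok) := by
    rw [hD, PySem.Dict.keys_foldl_modify_key]
    simp [PySem.Dict.keys_empty, PySem.Set.update, PySem.Set.ofList_eq_foldl]
  have hnodup : D.keys.Nodup := by
    rw [hkeys]; exact PySem.List.nodup_dedup _
  have hval : ∀ t, D.getD t [] = L.filter (fun e => pvFirstTok e == t) := by
    intro t
    have hmap : D = (L.map (fun e => (pvFirstTok e, e))).foldl
        (fun g p => g.modify p.1 [] (· ++ [p.2])) PySem.Dict.empty := by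
      rw [hD, List.foldl_map]
    rw [hmap, PySem.Dict.getD_foldl_modify_append]
    simp [PySem.Dict.getD_empty, List.filter_map, List.map_map, Function.comp_def]
  rw [items_eq_keys_map D hnodup, hkeys]
  apply List.map_congr_left
  intro t _
  rw [hval t]

theorem group_by_first_token_eq (items : List (List (String × List String))) (key : String) :
    group_by_first_token items key = group_by_first_token_alt items key := by
  unfold group_by_first_token group_by_first_token_alt
  have h1 : ∀ (l : List String) (d : PySem.Dict String (List String)),
      l.foldl (fun groups entry =>
          if PySem.Str.isIn "|" entry then
            groups.modify (pvFirstTok entry) [] (· ++ [entry])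
          else groups) d
        = (l.filter (fun e => PySem.Str.isIn "|" e)).foldl
            (fun g e => g.modify (pvFirstTok e) [] (· ++ [e])) d := by
    intro l d
    exact foldl_if_eq_foldl_filter _ _ l d
  simp only [h1]
  set g := fun (item : List (String × List String)) =>
    ((PySem.Dict.mk item).getD key []).filter (fun e => PySem.Str.isIn "|" e) with hg
  have h2 := foldl_foldl_eq_foldl_flatMap (g := g)
        (f := fun (gr : PySem.Dict String (List String)) e =>
          gr.modify (pvFirstTok e) [] (· ++ [e])) items PySem.Dict.empty
  rw [hg] at h2 ⊢
  rw [h2]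
  exact grouping_loop_items _

-- ===== VERDICT (by name: the statement is the Claim_ definition above) =====
theorem group_by_first_token_spec : Claim_equal_group_by_first_token := by
  intro items key _
  exact group_by_first_token_eq items key
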